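-- pv_equiv track=rewrite | github.com/n00-name/EGE-inf-2025 | rep/21.11.24/03.py | sum_even_divisors
-- ===== SOURCE A (Python) =====
-- def sum_even_divisors(x):
--     """Возвращает сумму четных делителей числа, если их не менее 4."""
--     even_divisors = []
--     for i in range(2, x + 1):  # Проверяем все делители числа
--         if x % i == 0 and i % 2 == 0:  # Четный делитель
--             even_divisors.append(i)
--     if len(even_divisors) >= 4:
--         return sum(even_divisors)
--     return 0
-- ===== SOURCE B (Python) =====
-- def sum_even_divisors(x):
--     """Возвращает сумму четных делителей числа, если их не менее 4."""
--     # Even divisors of x are exactly 2*j for divisors j of x//2 (x even),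
--     # so enumerate divisors of m = x//2 in pairs up to sqrt(m).
--     if x < 2 or x % 2 != 0:
--         return 0
--     m = x // 2
--     cnt = 0
--     s = 0
--     j = 1
--     while j * j <= m:
--         if m % j == 0:
--             k = m // j
--             cnt += 1
--             s += j
--             if k != j:
--                 cnt += 1
--                 s += k
--         j += 1
--     if cnt >= 4:
--         return 2 * s
--     return 0
-- ===== Notes on version B (the rewrite author's own statement) =====
-- stated objective: faster
-- what changed: Instead of trial-testing every i in 2..x, B reduces the problem to the divisors of m = x//2 (even divisors of x are exactly 2*j for j dividing m) and enumerates those divisors in pairs (j, m//j) up to sqrt(m), keeping only a running count and sum.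
import Mathlib
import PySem

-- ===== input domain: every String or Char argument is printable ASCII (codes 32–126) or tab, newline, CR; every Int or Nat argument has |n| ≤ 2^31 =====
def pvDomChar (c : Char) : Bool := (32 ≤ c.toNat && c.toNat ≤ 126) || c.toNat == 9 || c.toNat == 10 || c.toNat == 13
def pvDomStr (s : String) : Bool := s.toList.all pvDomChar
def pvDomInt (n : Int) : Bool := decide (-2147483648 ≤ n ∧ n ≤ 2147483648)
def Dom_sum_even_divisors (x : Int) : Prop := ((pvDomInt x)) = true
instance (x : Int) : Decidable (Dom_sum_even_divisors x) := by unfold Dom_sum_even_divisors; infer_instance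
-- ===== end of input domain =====

-- B replaces A's O(x) scan by an O(√x) paired-divisor enumeration of x//2 (even divisors of x are 2·(divisors of x//2)); return values proved equal for every Int x.

-- ===== PORT A =====
def sum_even_divisors (x : Int) : Int :=
  let even_divisors := (PySem.List.pyRange 2 (x + 1) 1).foldl
    (fun acc i => if PySem.Int.mod x i == 0 && PySem.Int.mod i 2 == 0 then acc ++ [i] else acc) []
  if 4 ≤ even_divisors.length then even_divisors.sum else 0

-- ===== PORT B =====
-- the 'while j * j <= m' loop of Source B, carrying (cnt, s); the Nat argument is
-- plain fuel making the recursion structural — it is chosen large enough that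
-- the guard 'j * j ≤ m' always fails before the fuel runs out
def sedLoop (m : Int) : Nat → Int → Int → Int → Int × Int
  | 0, _, cnt, s => (cnt, s)
  | fuel + 1, j, cnt, s =>
    if j * j ≤ m then
      if PySem.Int.mod m j == 0 then
        let k := PySem.Int.floordiv m j
        if k ≠ j then sedLoop m fuel (j + 1) (cnt + 1 + 1) (s + j + k)
        else sedLoop m fuel (j + 1) (cnt + 1) (s + j)
      else sedLoop m fuel (j + 1) cnt s
    else (cnt, s)

def sum_even_divisors_alt (x : Int) : Int :=
  if x < 2 ∨ PySem.Int.mod x 2 ≠ 0 then 0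
  else
    let m := PySem.Int.floordiv x 2
    let cs := sedLoop m m.toNat 1 0 0
    if 4 ≤ cs.1 then 2 * cs.2 else 0

-- ===== PRECONDITION & SPEC =====
def Spec_sum_even_divisors (x : Int) (out : Int) : Prop := out = sum_even_divisors_alt x
instance (x : Int) (out : Int) : Decidable (Spec_sum_even_divisors x out) := by unfold Spec_sum_even_divisors; infer_instance

-- ===== CLAIM (what is proved, stated in full; the proofs are below) =====
def Claim_equal_sum_even_divisors : Prop := ∀ (x : Int), Dom_sum_even_divisors x → Spec_sum_even_divisors x (sum_even_divisors x)

-- ===== LEMMAS AND PROOFS =====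

-- the divisors of m in [1, m]  (proof-side helper; not executed)
noncomputable def sedDiv (m : Int) : Finset ℤ := (Finset.Icc (1 : ℤ) m).filter (fun j => m % j = 0)

-- divisors of m not yet discovered by the loop at step j: those d with min(d, m/d) ≥ j
noncomputable def sedS (m j : Int) : Finset ℤ :=
  (Finset.Icc (1 : ℤ) m).filter (fun d => m % d = 0 ∧ j ≤ d ∧ j ≤ m / d)

theorem sed_div_mul {m d : Int} (_hd : 1 ≤ d) (h : m % d = 0) : m = d * (m / d) :=
  (Int.mul_ediv_cancel' (Int.dvd_of_emod_eq_zero h)).symm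

theorem sed_div_div {m d : Int} (hm : 1 ≤ m) (hd : 1 ≤ d) (h : m % d = 0) :
    m / (m / d) = d := by
  set k := m / d with hkdef
  have hmul : m = d * k := sed_div_mul hd h
  have hk : 1 ≤ k := by nlinarith
  rw [hmul, mul_comm, Int.mul_ediv_cancel_left d (by omega : k ≠ 0)]

theorem sedS_empty {m j : Int} (hj : 1 ≤ j) (h : ¬ j * j ≤ m) : sedS m j = ∅ := by
  unfold sedS
  rw [Finset.filter_eq_empty_iff]
  rintro d hd ⟨h1, h2, h3⟩
  rw [Finset.mem_Icc] at hd
  have hmul := sed_div_mul hd.1 h1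
  have hprod : j * j ≤ d * (m / d) :=
    mul_le_mul h2 h3 (by omega) (by omega)
  omega

theorem sedS_skip {m j : Int} (_hj : 1 ≤ j) (h : ¬ m % j = 0) : sedS m j = sedS m (j + 1) := by
  unfold sedS
  apply Finset.filter_congr
  intro d hd
  rw [Finset.mem_Icc] at hd
  constructor
  · rintro ⟨h1, h2, h3⟩
    refine ⟨h1, ?_, ?_⟩
    · rcases eq_or_lt_of_le h2 with he | hl
      · exfalso; apply h; rw [he]; exact h1
      · omega
    · rcases eq_or_lt_of_le h3 with he | hl
      · exfalso
        apply h
        have hmul := sed_div_mul hd.1 h1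
        apply Int.emod_eq_zero_of_dvd
        exact ⟨d, by rw [hmul, ← he]; ring⟩
      · omega
  · rintro ⟨h1, h2, h3⟩; exact ⟨h1, by omega, by omega⟩

theorem sedS_insert {m j : Int} (hm : 1 ≤ m) (hj : 1 ≤ j) (hsq : j * j ≤ m) (h : m % j = 0) :
    sedS m j = insert j (insert (m / j) (sedS m (j + 1))) := by
  have hmul := sed_div_mul hj h
  have hk1 : j ≤ m / j := by nlinarith
  have hjm : j ≤ m := by nlinarith
  have hkm : m / j ≤ m := by nlinarith
  apply Finset.ext
  intro d
  simp only [sedS, Finset.mem_insert, Finset.mem_filter, Finset.mem_Icc]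
  constructor
  · rintro ⟨hd, h1, h2, h3⟩
    by_cases hdj : d = j
    · exact Or.inl hdj
    by_cases hdk : d = m / j
    · exact Or.inr (Or.inl hdk)
    refine Or.inr (Or.inr ⟨hd, h1, by omega, ?_⟩)
    rcases eq_or_lt_of_le h3 with he | hl
    · exfalso
      apply hdk
      have hdd : m / (m / d) = d := sed_div_div hm hd.1 h1
      rw [← he] at hdd
      exact hdd.symm
    · omega
  · rintro (rfl | rfl | ⟨hd, h1, h2, h3⟩)
    · exact ⟨⟨hj, hjm⟩, h, le_refl _, hk1⟩
    · refine ⟨⟨by omega, hkm⟩, ?_, hk1, ?_⟩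
      · refine Int.emod_eq_zero_of_dvd ⟨j, ?_⟩
        conv_lhs => rw [hmul]
        ring
      · rw [sed_div_div hm hj h]
    · exact ⟨hd, h1, by omega, by omega⟩

theorem sedS_one {m : Int} (hm : 1 ≤ m) : sedS m 1 = sedDiv m := by
  unfold sedS sedDiv
  apply Finset.filter_congr
  intro d hd
  rw [Finset.mem_Icc] at hd
  constructor
  · rintro ⟨h1, _, _⟩; exact h1
  · intro h1
    refine ⟨h1, hd.1, ?_⟩
    have hmul := sed_div_mul hd.1 h1
    nlinarith

theorem sedLoop_spec (m : Int) (hm : 1 ≤ m) (fuel : Nat) (j cnt s : Int) (hj : 1 ≤ j)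
    (hfuel : m + 1 - j ≤ (fuel : Int)) :
    sedLoop m fuel j cnt s = (cnt + ((sedS m j).card : Int), s + (sedS m j).sum id) := by
  induction fuel generalizing j cnt s with
  | zero =>
    have hstop : ¬ j * j ≤ m := by
      intro hcon
      have h2 : j * 1 ≤ j * j := mul_le_mul_of_nonneg_left (by omega) (by omega)
      rw [mul_one] at h2
      simp only [Nat.cast_zero] at hfuel
      omega
    rw [sedLoop, sedS_empty hj hstop]
    simp
  | succ fuel ih =>
    rw [sedLoop]
    by_cases hsq : j * j ≤ m
    · rw [if_pos hsq]
      have hjpos : (0 : Int) < j := by omega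
      have hfuel' : m + 1 - (j + 1) ≤ (fuel : Int) := by push_cast at hfuel ⊢; omega
      rw [PySem.Int.mod_eq_emod_of_pos hjpos, PySem.Int.floordiv_eq_ediv_of_pos hjpos]
      by_cases hdvd : m % j = 0
      · rw [if_pos (by simp [hdvd])]
        have hmul := sed_div_mul hj hdvd
        have hk1 : j ≤ m / j := by nlinarith
        have hins := sedS_insert hm hj hsq hdvd
        have hjnot : j ∉ sedS m (j + 1) := by
          unfold sedS
          rw [Finset.mem_filter]
          rintro ⟨_, _, hcon, _⟩
          omega
        have hknot : m / j ∉ sedS m (j + 1) := by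
          unfold sedS
          rw [Finset.mem_filter]
          rintro ⟨_, _, _, hcon⟩
          rw [sed_div_div hm hj hdvd] at hcon
          omega
        by_cases hne : m / j = j
        · rw [if_neg (by omega : ¬ m / j ≠ j)]
          rw [ih (j + 1) (cnt + 1) (s + j) (by omega) hfuel']
          rw [hins, hne, Finset.insert_idem, Finset.card_insert_of_notMem hjnot,
            Finset.sum_insert hjnot]
          simp only [Prod.mk.injEq, id]
          constructor
          · push_cast; ring
          · ring
        · rw [if_pos hne]
          rw [ih (j + 1) (cnt + 1 + 1) (s + j + m / j) (by omega) hfuel']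
          have hjnot2 : j ∉ insert (m / j) (sedS m (j + 1)) := by
            rw [Finset.mem_insert]
            rintro (hcon | hcon)
            · exact hne hcon.symm
            · exact hjnot hcon
          rw [hins, Finset.card_insert_of_notMem hjnot2, Finset.card_insert_of_notMem hknot,
            Finset.sum_insert hjnot2, Finset.sum_insert hknot]
          simp only [Prod.mk.injEq, id]
          constructor
          · push_cast; ring
          · ring
      · rw [if_neg (by simp [hdvd])]
        rw [ih (j + 1) cnt s (by omega) hfuel', sedS_skip hj hdvd]
    · rw [if_neg hsq, sedS_empty hj hsq]
      simp

-- list-level count/sum of a filtered int range, as card/sum of a filtered Finset.Icc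
theorem sed_range_filter (p : Int → Bool) (b a : Int) :
    ((PySem.List.pyRange a (b + 1) 1).filter p).length
      = ((Finset.Icc a b).filter (fun d => p d = true)).card
    ∧ ((PySem.List.pyRange a (b + 1) 1).filter p).sum
      = ((Finset.Icc a b).filter (fun d => p d = true)).sum id := by
  by_cases hab : a ≤ b
  · have hrec := sed_range_filter p b (a + 1)
    rw [PySem.List.pyRange_one_cons (by omega : a < b + 1)]
    have hicc : Finset.Icc a b = insert a (Finset.Icc (a + 1) b) := by
      apply Finset.ext; intro d
      simp only [Finset.mem_insert, Finset.mem_Icc]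
      omega
    have hanot : a ∉ (Finset.Icc (a + 1) b).filter (fun d => p d = true) := by
      rw [Finset.mem_filter, Finset.mem_Icc]
      rintro ⟨⟨hcon, _⟩, _⟩
      omega
    rw [hicc, Finset.filter_insert]
    by_cases hpa : p a = true
    · rw [if_pos hpa]
      simp only [List.filter_cons, hpa, if_true, List.length_cons, List.sum_cons,
        Finset.card_insert_of_notMem hanot, Finset.sum_insert hanot]
      exact ⟨by omega, by rw [hrec.2]; simp [id]⟩
    · rw [if_neg hpa]
      simp only [List.filter_cons, hpa, Bool.false_eq_true, if_false]
      exact hrec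
  · rw [PySem.List.pyRange_one_eq_nil (by omega), Finset.Icc_eq_empty (by omega)]
    simp
termination_by (b + 1 - a).toNat
decreasing_by omega

-- the even divisors of x = 2m in [2, x] are exactly the doubles of sedDiv m
theorem sed_even_image {m : Int} (_hm : 1 ≤ m) :
    (Finset.Icc (2 : ℤ) (2 * m)).filter
        (fun d => (PySem.Int.mod (2 * m) d == 0 && PySem.Int.mod d 2 == 0) = true)
      = (sedDiv m).image (fun j => 2 * j) := by
  apply Finset.ext
  intro d
  simp only [Finset.mem_filter, Finset.mem_Icc, Finset.mem_image, sedDiv,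
    Bool.and_eq_true, beq_iff_eq]
  constructor
  · rintro ⟨⟨h2, hx⟩, hmod, heven⟩
    rw [PySem.Int.mod_eq_emod_of_pos (by omega : (0:Int) < d)] at hmod
    rw [PySem.Int.mod_eq_emod_of_pos (by norm_num : (0:Int) < 2)] at heven
    have hdvd2 : (2 : ℤ) ∣ d := Int.dvd_of_emod_eq_zero heven
    obtain ⟨j, rfl⟩ := hdvd2
    have hdvd : 2 * j ∣ 2 * m := Int.dvd_of_emod_eq_zero hmod
    have hjm : j ∣ m := (mul_dvd_mul_iff_left (by norm_num : (2:ℤ) ≠ 0)).mp hdvd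
    exact ⟨j, ⟨⟨by omega, by omega⟩, Int.emod_eq_zero_of_dvd hjm⟩, rfl⟩
  · rintro ⟨j, ⟨⟨h1, hjm⟩, hmod⟩, rfl⟩
    have hjdvd : j ∣ m := Int.dvd_of_emod_eq_zero hmod
    refine ⟨⟨by omega, by omega⟩, ?_, ?_⟩
    · rw [PySem.Int.mod_eq_emod_of_pos (by omega : (0:Int) < 2 * j)]
      exact Int.emod_eq_zero_of_dvd (mul_dvd_mul_left 2 hjdvd)
    · rw [PySem.Int.mod_eq_emod_of_pos (by norm_num : (0:Int) < 2)]
      exact Int.emod_eq_zero_of_dvd ⟨j, rfl⟩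

theorem sed_double_inj {m : Int} : Set.InjOn (fun j : ℤ => 2 * j) (sedDiv m) := by
  intro a _ b _ h
  simpa using h

-- ===== VERDICT (by name: the statement is the Claim_ definition above) =====
theorem sum_even_divisors_spec : Claim_equal_sum_even_divisors := by
  intro x _
  unfold Spec_sum_even_divisors sum_even_divisors sum_even_divisors_alt
  by_cases hx2 : x < 2
  · rw [PySem.List.pyRange_one_eq_nil (by omega)]
    simp [hx2]
  · rw [PySem.List.foldl_append_if_eq_filter]
    simp only [List.nil_append]
    by_cases hodd : PySem.Int.mod x 2 = 0
    · have hcond : ¬ (x < 2 ∨ PySem.Int.mod x 2 ≠ 0) := by push Not; exact ⟨by omega, hodd⟩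
      conv_rhs => rw [if_neg hcond]
      rw [PySem.Int.mod_eq_emod_of_pos (by norm_num : (0:Int) < 2)] at hodd
      obtain ⟨m, rfl⟩ : ∃ m, x = 2 * m := ⟨x / 2, by omega⟩
      have hm1 : 1 ≤ m := by omega
      rw [PySem.Int.floordiv_eq_ediv_of_pos (by norm_num : (0:Int) < 2)]
      have hdiv2 : 2 * m / 2 = m := by omega
      rw [hdiv2]
      have hrange := sed_range_filter
        (fun i => PySem.Int.mod (2 * m) i == 0 && PySem.Int.mod i 2 == 0) (2 * m) 2
      rw [sedLoop_spec m hm1 m.toNat 1 0 0 (by norm_num) (by omega), sedS_one hm1]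
      rw [hrange.1, hrange.2]
      rw [show ((Finset.Icc (2:ℤ) (2 * m)).filter
            (fun d => (PySem.Int.mod (2 * m) d == 0 && PySem.Int.mod d 2 == 0) = true))
          = (sedDiv m).image (fun j => 2 * j) from sed_even_image hm1]
      rw [Finset.card_image_of_injOn sed_double_inj,
        Finset.sum_image (fun a ha b hb hab => sed_double_inj ha hb hab)]
      dsimp only
      simp only [id, zero_add]
      rw [← Finset.mul_sum]
      by_cases hc : 4 ≤ (sedDiv m).card
      · rw [if_pos hc, if_pos (by exact_mod_cast hc)]
      · rw [if_neg hc, if_neg (by exact_mod_cast hc)]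
    · have hnil : (PySem.List.pyRange 2 (x + 1) 1).filter
          (fun i => PySem.Int.mod x i == 0 && PySem.Int.mod i 2 == 0) = [] := by
        rw [List.filter_eq_nil_iff]
        intro i hi
        rw [PySem.List.mem_pyRange_one] at hi
        simp only [Bool.and_eq_true, beq_iff_eq, not_and]
        intro hmod heven
        rw [PySem.Int.mod_eq_emod_of_pos (by omega : (0:Int) < i)] at hmod
        rw [PySem.Int.mod_eq_emod_of_pos (by norm_num : (0:Int) < 2)] at heven
        apply hodd
        rw [PySem.Int.mod_eq_emod_of_pos (by norm_num : (0:Int) < 2)]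
        exact Int.emod_eq_zero_of_dvd
          ((Int.dvd_of_emod_eq_zero heven).trans (Int.dvd_of_emod_eq_zero hmod))
      rw [hnil, if_pos (Or.inr hodd)]
      simp
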